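-- pv_equiv track=rewrite | github.com/harini24/algoexpert-solutions | Dynamic programming/maximise expression/sol.py | maximizeExpression
-- ===== SOURCE A (Python) =====
-- def maximizeExpression(array):
--     # Write your code here.
--     if len(array) < 4: return 0
--     maxOfA=[0]*len(array)
--     maxOfAMinusB=[float("-inf")]*len(array)
--     maxOfAMinusBPlusC=[float("-inf")]*len(array)
--     maxOfAMinusBPlusCMinusD=[float("-inf")]*len(array)
--     maxOfA[0] = array[0]
--     for i in range(1,len(array)):
--         maxOfA[i] =  max(array[i],maxOfA[i-1])
--     for i in range(1,len(array)):
--         maxOfAMinusB[i] =  max(maxOfA[i-1]-array[i],maxOfAMinusB[i-1])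
--     for i in range(2,len(array)):
--         maxOfAMinusBPlusC[i] =  max(maxOfAMinusB[i-1]+array[i],maxOfAMinusBPlusC[i-1])
--     for i in range(3,len(array)):
--         maxOfAMinusBPlusCMinusD[i] =  max(maxOfAMinusBPlusC[i-1]-array[i],maxOfAMinusBPlusCMinusD[i-1])
--     return maxOfAMinusBPlusCMinusD[-1]
-- ===== SOURCE B (Python) =====
-- def maximizeExpression(array):
--     # Meet-in-the-middle: best pair (A-B) from each prefix, best pair (C-D)
--     # from each suffix, then combine over the split point between B and C.
--     if len(array) < 4:
--         return 0
--     n = len(array)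
--     left = [0] * n          # left[k]: best array[a]-array[b] over a < b <= k  (k >= 1)
--     left[1] = array[0] - array[1]
--     pmax = max(array[0], array[1])
--     for k in range(2, n):
--         left[k] = max(left[k - 1], pmax - array[k])
--         pmax = max(pmax, array[k])
--     right = [0] * n         # right[j]: best array[c]-array[d] over j <= c < d <= n-1
--     right[n - 2] = array[n - 2] - array[n - 1]
--     smin = min(array[n - 2], array[n - 1])
--     for j in range(n - 3, -1, -1):
--         right[j] = max(right[j + 1], array[j] - smin)
--         smin = min(smin, array[j])
--     best = left[1] + right[2]
--     for k in range(2, n - 2):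
--         best = max(best, left[k] + right[k + 1])
--     return best
-- ===== Notes on version B (the rewrite author's own statement) =====
-- stated objective: alternative
-- what changed: Replaced A's chained four-state left-to-right DP (tables for A, A-B, A-B+C, A-B+C-D) by a meet-in-the-middle scheme: one forward pass computing the best pair array[a]-array[b] for every prefix, one backward pass computing the best pair array[c]-array[d] for every suffix, then a combine pass maximising prefix-pair + suffix-pair over the split point.
import Mathlib
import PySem

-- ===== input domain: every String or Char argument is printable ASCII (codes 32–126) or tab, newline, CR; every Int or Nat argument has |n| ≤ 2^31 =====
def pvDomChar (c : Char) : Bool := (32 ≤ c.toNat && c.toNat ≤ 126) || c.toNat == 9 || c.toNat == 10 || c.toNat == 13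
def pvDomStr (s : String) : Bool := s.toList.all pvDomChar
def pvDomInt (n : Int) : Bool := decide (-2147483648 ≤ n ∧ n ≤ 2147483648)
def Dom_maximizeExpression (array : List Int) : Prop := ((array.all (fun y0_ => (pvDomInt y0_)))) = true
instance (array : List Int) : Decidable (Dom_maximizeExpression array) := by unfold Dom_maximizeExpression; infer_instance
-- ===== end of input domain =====

-- ===== PORT A =====
-- B replaces A's chained four-state DP by a meet-in-the-middle scheme: best prefix pair (A-B),
-- best suffix pair (C-D), combined over the split point (same O(n) cost, different decomposition).
-- A-side helpers: arrays are ported as functions Nat -> Option Int; `none` represents A's float("-inf")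
-- sentinel (exact: -inf only compares/propagates, every value A returns is an int).
-- Python max(candidate, old) with -inf as none:
def pvOmax (x y : Option Int) : Option Int :=
  match x, y with
  | none, y => y
  | some v, none => some v
  | some v, some w => some (max v w)

-- `for i in range(start, n): arr[i] = max(a i, arr[i-1])`  (pass 1, Int-valued array)
def pvLoop1 (n : Nat) (a : Nat → Int) (g : Nat → Int) (i : Nat) : Nat → Int :=
  if _h : i < n then
    pvLoop1 n a (fun j => if j = i then max (a i) (g (i - 1)) else g j) (i + 1)
  else g
termination_by n - i

-- `for i in range(start, n): arr[i] = max(cand i, arr[i-1])` (passes 2–4; candidate cand i is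
-- prevArray[i-1] ± array[i], computed from the already-finished previous pass, so a pure function of i)
def pvLoopO (n : Nat) (cand : Nat → Option Int) (g : Nat → Option Int) (i : Nat) : Nat → Option Int :=
  if _h : i < n then
    pvLoopO n cand (fun j => if j = i then pvOmax (cand i) (g (i - 1)) else g j) (i + 1)
  else g
termination_by n - i

def maximizeExpression (array : List Int) : Int :=
  if array.length < 4 then 0
  else
    let n := array.length
    let a : Nat → Int := fun i => array.getD i 0   -- array[i]; every access is at 0 ≤ i < n, so exact
    -- maxOfA = [0]*n; maxOfA[0] = array[0]; pass 1
    let maxOfA := pvLoop1 n a (fun j => if j = 0 then a 0 else 0) 1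
    -- maxOfAMinusB = [-inf]*n; pass 2
    let maxOfAMinusB := pvLoopO n (fun i => some (maxOfA (i - 1) - a i)) (fun _ => none) 1
    -- maxOfAMinusBPlusC = [-inf]*n; pass 3
    let maxOfAMinusBPlusC := pvLoopO n (fun i => (maxOfAMinusB (i - 1)).map (· + a i)) (fun _ => none) 2
    -- maxOfAMinusBPlusCMinusD = [-inf]*n; pass 4
    let maxOfAMinusBPlusCMinusD := pvLoopO n (fun i => (maxOfAMinusBPlusC (i - 1)).map (· - a i)) (fun _ => none) 3
    -- return maxOfAMinusBPlusCMinusD[-1]  (index n-1; a `some` value whenever n ≥ 4, so getD 0 is unreachable)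
    (maxOfAMinusBPlusCMinusD (n - 1)).getD 0

-- ===== PORT B =====
-- `for k in range(2, n): left[k] = max(left[k-1], pmax - array[k]); pmax = max(pmax, array[k])`
def pvLoopL (n : Nat) (a : Nat → Int) (g : Nat → Int) (pm : Int) (k : Nat) : (Nat → Int) × Int :=
  if _h : k < n then
    pvLoopL n a (fun j => if j = k then max (g (k - 1)) (pm - a k) else g j) (max pm (a k)) (k + 1)
  else (g, pm)
termination_by n - k

-- `for j in range(n-3, -1, -1): right[j] = max(right[j+1], array[j] - smin); smin = min(smin, array[j])`
-- (the Nat argument counts iterations left; current j is that argument minus one)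
def pvLoopR (a : Nat → Int) : (Nat → Int) → Int → Nat → (Nat → Int) × Int
  | g, sm, 0 => (g, sm)
  | g, sm, j + 1 => pvLoopR a (fun t => if t = j then max (g (j + 1)) (a j - sm) else g t) (min sm (a j)) j

-- `for k in range(2, n-2): best = max(best, left[k] + right[k+1])`
def pvLoopC (n : Nat) (lf rt : Nat → Int) (best : Int) (k : Nat) : Int :=
  if _h : k < n - 2 then pvLoopC n lf rt (max best (lf k + rt (k + 1))) (k + 1) else best
termination_by n - 2 - k

def maximizeExpression_alt (array : List Int) : Int :=
  if array.length < 4 then 0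
  else
    let n := array.length
    let a : Nat → Int := fun i => array.getD i 0   -- array[i]; every access is at 0 ≤ i < n, so exact
    -- left = [0]*n; left[1] = array[0] - array[1]; pmax = max(array[0], array[1]); forward loop
    let lf := (pvLoopL n a (fun j => if j = 1 then a 0 - a 1 else 0) (max (a 0) (a 1)) 2).1
    -- right = [0]*n; right[n-2] = array[n-2] - array[n-1]; smin = min(array[n-2], array[n-1]); backward loop
    let rt := (pvLoopR a (fun j => if j = n - 2 then a (n - 2) - a (n - 1) else 0)
                (min (a (n - 2)) (a (n - 1))) (n - 2)).1
    -- best = left[1] + right[2]; combine loop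
    pvLoopC n lf rt (lf 1 + rt 2) 2

-- ===== PRECONDITION & SPEC =====
def Spec_maximizeExpression (array : List Int) (out : Int) : Prop := out = maximizeExpression_alt array
instance (array : List Int) (out : Int) : Decidable (Spec_maximizeExpression array out) := by unfold Spec_maximizeExpression; infer_instance

-- ===== CLAIM (what is proved, stated in full; the proofs are below) =====
def Claim_equal_maximizeExpression : Prop := ∀ (array : List Int), Dom_maximizeExpression array → Spec_maximizeExpression array (maximizeExpression array)

-- ===== LEMMAS AND PROOFS =====

-- The per-index recurrences A computes (proof-only characterisation).
def recA (a : Nat → Int) : Nat → Int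
  | 0 => a 0
  | i + 1 => max (a (i + 1)) (recA a i)

def recAB (a : Nat → Int) : Nat → Option Int
  | 0 => none
  | i + 1 => pvOmax (some (recA a i - a (i + 1))) (recAB a i)

def recABC (a : Nat → Int) : Nat → Option Int
  | 0 => none
  | i + 1 => pvOmax ((recAB a i).map (· + a (i + 1))) (recABC a i)

def recABCD (a : Nat → Int) : Nat → Option Int
  | 0 => none
  | i + 1 => pvOmax ((recABC a i).map (· - a (i + 1))) (recABCD a i)

lemma pvLoop1_spec (n : Nat) (a : Nat → Int) :
    ∀ d i g, n - i = d → 1 ≤ i → (∀ j, j < i → g j = recA a j) →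
    ∀ k, k < n → pvLoop1 n a g i k = recA a k := by
  intro d
  induction d with
  | zero =>
    intro i g hd h1 hg k hk
    rw [pvLoop1]
    have hni : ¬ i < n := by omega
    simp only [hni, reduceDIte]
    exact hg k (by omega)
  | succ d ih =>
    intro i g hd h1 hg k hk
    rw [pvLoop1]
    have hin : i < n := by omega
    simp only [hin, reduceDIte]
    refine ih (i + 1) _ (by omega) (by omega) ?_ k hk
    intro j hj
    by_cases hji : j = i
    · subst hji
      obtain ⟨m, rfl⟩ : ∃ m, j = m + 1 := ⟨j - 1, by omega⟩
      rw [if_pos rfl]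
      simp only [Nat.add_sub_cancel]
      rw [hg m (by omega), recA]
    · simp only [hji, if_false]
      exact hg j (by omega)

lemma pvLoopO_spec (n : Nat) (cand : Nat → Option Int) (h : Nat → Option Int)
    (hrec : ∀ j, 1 ≤ j → j < n → h j = pvOmax (cand j) (h (j - 1))) :
    ∀ d i g, n - i = d → 1 ≤ i → (∀ j, j < i → g j = h j) →
    ∀ k, k < n → pvLoopO n cand g i k = h k := by
  intro d
  induction d with
  | zero =>
    intro i g hd h1 hg k hk
    rw [pvLoopO]
    have hni : ¬ i < n := by omega
    simp only [hni, reduceDIte]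
    exact hg k (by omega)
  | succ d ih =>
    intro i g hd h1 hg k hk
    rw [pvLoopO]
    have hin : i < n := by omega
    simp only [hin, reduceDIte]
    refine ih (i + 1) _ (by omega) (by omega) ?_ k hk
    intro j hj
    by_cases hji : j = i
    · subst hji
      rw [if_pos rfl, hg (j - 1) (by omega)]
      exact (hrec j (by omega) (by omega)).symm
    · simp only [hji, if_false]
      exact hg j (by omega)

-- A's result equals the recurrence value at n-1
lemma portA_eq (array : List Int) (h4 : ¬ array.length < 4) :
    maximizeExpression array =
      (recABCD (fun i => array.getD i 0) (array.length - 1)).getD 0 := by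
  simp only [maximizeExpression, h4, if_false]
  have hA := pvLoop1_spec array.length (fun i => array.getD i 0) (array.length - 1) 1
    (fun j => if j = 0 then array.getD 0 0 else 0) rfl (by omega)
    (by intro j hj
        have hj0 : j = 0 := by omega
        subst hj0
        simp [recA])
  have hAB := pvLoopO_spec array.length
    (fun i => some ((pvLoop1 array.length (fun i => array.getD i 0)
        (fun j => if j = 0 then array.getD 0 0 else 0) 1) (i - 1) - array.getD i 0))
    (recAB (fun i => array.getD i 0))
    (by intro j h1 hjn
        obtain ⟨m, rfl⟩ : ∃ m, j = m + 1 := ⟨j - 1, by omega⟩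
        simp only [Nat.add_sub_cancel]
        rw [hA m (by omega), recAB])
    (array.length - 1) 1 (fun _ => none) rfl (by omega)
    (by intro j hj
        have hj0 : j = 0 := by omega
        subst hj0
        simp [recAB])
  have hABC := pvLoopO_spec array.length
    (fun i => ((pvLoopO array.length
        (fun i => some ((pvLoop1 array.length (fun i => array.getD i 0)
            (fun j => if j = 0 then array.getD 0 0 else 0) 1) (i - 1) - array.getD i 0))
        (fun _ => none) 1) (i - 1)).map (· + array.getD i 0))
    (recABC (fun i => array.getD i 0))
    (by intro j h1 hjn
        obtain ⟨m, rfl⟩ : ∃ m, j = m + 1 := ⟨j - 1, by omega⟩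
        simp only [Nat.add_sub_cancel]
        rw [hAB m (by omega), recABC])
    (array.length - 2) 2 (fun _ => none) (by omega) (by omega)
    (by intro j hj
        interval_cases j
        · simp [recABC]
        · simp [recABC, recAB, pvOmax])
  have hABCD := pvLoopO_spec array.length
    (fun i => ((pvLoopO array.length
        (fun i => ((pvLoopO array.length
            (fun i => some ((pvLoop1 array.length (fun i => array.getD i 0)
                (fun j => if j = 0 then array.getD 0 0 else 0) 1) (i - 1) - array.getD i 0))
            (fun _ => none) 1) (i - 1)).map (· + array.getD i 0))
        (fun _ => none) 2) (i - 1)).map (· - array.getD i 0))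
    (recABCD (fun i => array.getD i 0))
    (by intro j h1 hjn
        obtain ⟨m, rfl⟩ : ∃ m, j = m + 1 := ⟨j - 1, by omega⟩
        simp only [Nat.add_sub_cancel]
        rw [hABC m (by omega), recABCD])
    (array.length - 3) 3 (fun _ => none) (by omega) (by omega)
    (by intro j hj
        interval_cases j
        · simp [recABCD]
        · simp [recABCD, recABC, pvOmax]
        · simp [recABCD, recABC, recAB, pvOmax])
  rw [hABCD (array.length - 1) (by omega)]

-- ---- B-side reference functions ----

-- max of f over the index interval [lo, lo+d]
def imax (f : Nat → Int) (lo : Nat) : Nat → Int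
  | 0 => f lo
  | d + 1 => max (imax f lo d) (f (lo + d + 1))

-- reference value of B's left[] : best a p - a q over p < q ≤ k
def refL (a : Nat → Int) : Nat → Int
  | 0 => 0
  | 1 => a 0 - a 1
  | k + 2 => max (refL a (k + 1)) (recA a (k + 1) - a (k + 2))

-- reference value of B's smin : min of a over [j, last]
def refMin (a : Nat → Int) (last j : Nat) : Int :=
  if _h : j < last then min (a j) (refMin a last (j + 1)) else a last
termination_by last - j

-- reference value of B's right[] : best a c - a d over j ≤ c < d ≤ last
def refR (a : Nat → Int) (last j : Nat) : Int :=
  if _h : j + 1 < last then max (refR a last (j + 1)) (a j - refMin a last (j + 1))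
  else a (last - 1) - a last
termination_by last - j

lemma imax_peelL (f : Nat → Int) : ∀ d lo, imax f lo (d + 1) = max (f lo) (imax f (lo + 1) d) := by
  intro d
  induction d with
  | zero => intro lo; simp [imax]
  | succ d ih =>
    intro lo
    rw [show d + 1 + 1 = (d + 1) + 1 from rfl, imax, ih lo, imax,
      show lo + (d + 1) + 1 = lo + 1 + d + 1 from by omega, max_assoc]

lemma imax_congr (f g : Nat → Int) : ∀ d lo, (∀ k, lo ≤ k → k ≤ lo + d → f k = g k) →
    imax f lo d = imax g lo d := by
  intro d
  induction d with
  | zero => intro lo h; simpa [imax] using h lo (by omega) (by omega)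
  | succ d ih =>
    intro lo h
    rw [imax, imax, ih lo (fun k h1 h2 => h k h1 (by omega)), h (lo + d + 1) (by omega) (by omega)]

lemma imax_split (f u v : Nat → Int) : ∀ d lo, (∀ k, lo ≤ k → k ≤ lo + d → f k = max (u k) (v k)) →
    imax f lo d = max (imax u lo d) (imax v lo d) := by
  intro d
  induction d with
  | zero => intro lo h; simpa [imax] using h lo (by omega) (by omega)
  | succ d ih =>
    intro lo h
    rw [imax, imax, imax, ih lo (fun k h1 h2 => h k h1 (by omega)),
      h (lo + d + 1) (by omega) (by omega)]
    omega

lemma imax_sub (g : Nat → Int) (c : Int) : ∀ d lo, imax (fun k => g k - c) lo d = imax g lo d - c := by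
  intro d
  induction d with
  | zero => intro lo; simp [imax]
  | succ d ih => intro lo; rw [imax, imax, ih]; omega

lemma imax_add (g : Nat → Int) (c : Int) : ∀ d lo, imax (fun k => g k + c) lo d = imax g lo d + c := by
  intro d
  induction d with
  | zero => intro lo; simp [imax]
  | succ d ih => intro lo; rw [imax, imax, ih]; omega

lemma imax_monoLast (f : Nat → Int) : ∀ d lo, (∀ k, lo ≤ k → f k ≤ f (k + 1)) →
    imax f lo d = f (lo + d) := by
  intro d
  induction d with
  | zero => intro lo _; simp [imax]
  | succ d ih =>
    intro lo h
    rw [imax, ih lo h]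
    exact max_eq_right (h (lo + d) (by omega))

lemma refL_mono (a : Nat → Int) (k : Nat) (hk : 1 ≤ k) : refL a k ≤ refL a (k + 1) := by
  obtain ⟨m, rfl⟩ : ∃ m, k = m + 1 := ⟨k - 1, by omega⟩
  rw [show m + 1 + 1 = m + 2 from rfl, refL]
  exact le_max_left _ _

lemma refL_succ (a : Nat → Int) (k : Nat) (hk : 2 ≤ k) :
    refL a k = max (refL a (k - 1)) (recA a (k - 1) - a k) := by
  obtain ⟨m, rfl⟩ : ∃ m, k = m + 2 := ⟨k - 2, by omega⟩
  rw [refL]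
  congr 2

lemma recA_succ (a : Nat → Int) (k : Nat) (hk : 1 ≤ k) :
    recA a k = max (recA a (k - 1)) (a k) := by
  obtain ⟨m, rfl⟩ : ∃ m, k = m + 1 := ⟨k - 1, by omega⟩
  rw [recA]
  simp [max_comm]

lemma recAB_refL (a : Nat → Int) : ∀ k, recAB a (k + 1) = some (refL a (k + 1)) := by
  intro k
  induction k with
  | zero => simp [recAB, recA, pvOmax, refL]
  | succ k ih =>
    rw [recAB, ih]
    simp [pvOmax, refL, max_comm]

lemma refMin_last (a : Nat → Int) (last : Nat) : refMin a last last = a last := by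
  rw [refMin]; simp

lemma refMin_lt (a : Nat → Int) (last j : Nat) (h : j < last) :
    refMin a last j = min (a j) (refMin a last (j + 1)) := by
  rw [refMin]; simp [h]

lemma refMin_step (a : Nat → Int) (m : Nat) : ∀ d j, m - j = d → j ≤ m →
    refMin a (m + 1) j = min (refMin a m j) (a (m + 1)) := by
  intro d
  induction d with
  | zero =>
    intro j hd hj
    have : j = m := by omega
    subst this
    rw [refMin_lt a (j + 1) j (by omega), refMin_last, refMin_last]
  | succ d ih =>
    intro j hd hj
    have hjm : j < m := by omega
    rw [refMin_lt a (m + 1) j (by omega), ih (j + 1) (by omega) (by omega),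
      refMin_lt a m j hjm]
    omega

lemma refR_char (a : Nat → Int) (last : Nat) : ∀ d j, last - 1 - j = d → j + 1 ≤ last →
    refR a last j = imax (fun c => a c - refMin a last (c + 1)) j d := by
  intro d
  induction d with
  | zero =>
    intro j hd hj
    have : j = last - 1 := by omega
    rw [refR]
    have h2 : ¬ j + 1 < last := by omega
    simp only [h2, reduceDIte, imax]
    rw [this, show last - 1 + 1 = last from by omega, refMin_last]
  | succ d ih =>
    intro j hd hj
    rw [refR]
    have h2 : j + 1 < last := by omega
    simp only [h2, reduceDIte]
    rw [ih (j + 1) (by omega) (by omega), imax_peelL]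
    omega

lemma refR_step (a : Nat → Int) (m j : Nat) (hj : j + 1 ≤ m) :
    refR a (m + 1) j = max (refR a m j) (imax a j (m - j) - a (m + 1)) := by
  rw [refR_char a (m + 1) (m - j) j (by omega) (by omega)]
  obtain ⟨e, he⟩ : ∃ e, m - j = e + 1 := ⟨m - j - 1, by omega⟩
  rw [he, imax]
  have htop : j + e + 1 = m := by omega
  rw [htop, refMin_last]
  have hmid : imax (fun c => a c - refMin a (m + 1) (c + 1)) j e
      = max (refR a m j) (imax a j e - a (m + 1)) := by
    rw [imax_split (fun c => a c - refMin a (m + 1) (c + 1))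
        (fun c => a c - refMin a m (c + 1)) (fun c => a c - a (m + 1)) e j
        (by intro c h1 h2
            show a c - refMin a (m + 1) (c + 1)
              = max (a c - refMin a m (c + 1)) (a c - a (m + 1))
            rw [refMin_step a m (m - (c + 1)) (c + 1) rfl (by omega)]
            omega),
      imax_sub, ← refR_char a m e j (by omega) (by omega)]
  rw [hmid]
  have hpeel : imax a j (e + 1) = max (imax a j e) (a m) := by
    rw [imax, htop]
  rw [hpeel]
  omega

-- recABC characterised by split point: best (prefix pair up to k) + (single element in [k+1, m])
lemma recABC_char (a : Nat → Int) : ∀ d,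
    recABC a (d + 2) = some (imax (fun k => refL a k + imax a (k + 1) (d + 1 - k)) 1 d) := by
  intro d
  induction d with
  | zero =>
    rw [show (0:Nat) + 2 = 1 + 1 from rfl, recABC, recAB_refL]
    simp [recABC, recAB, pvOmax, imax]
  | succ d ih =>
    rw [show d + 1 + 2 = (d + 2) + 1 from rfl, recABC, recAB_refL, ih]
    simp only [pvOmax, Option.map_some]
    congr 1
    rw [imax]
    simp only [show (1:Nat) + d + 1 = d + 2 from by omega,
      show d + 1 + 1 - (d + 2) = 0 from by omega,
      show d + 1 + 1 = d + 2 from by omega, show d + 2 + 1 = d + 3 from by omega, imax]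
    have hmid : imax (fun k => refL a k + imax a (k + 1) (d + 2 - k)) 1 d
        = max (imax (fun k => refL a k + imax a (k + 1) (d + 1 - k)) 1 d)
              (imax (fun k => refL a k + a (d + 3)) 1 d) := by
      refine imax_split _ _ _ d 1 ?_
      intro k h1 h2
      show refL a k + imax a (k + 1) (d + 2 - k)
        = max (refL a k + imax a (k + 1) (d + 1 - k)) (refL a k + a (d + 3))
      rw [show d + 2 - k = (d + 1 - k) + 1 from by omega, imax,
        show k + 1 + (d + 1 - k) + 1 = d + 3 from by omega]
      omega
    have hconst : imax (fun k => refL a k + a (d + 3)) 1 d = refL a (d + 1) + a (d + 3) := by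
      rw [imax_add (refL a) (a (d + 3)) d 1,
        imax_monoLast (refL a) d 1 (fun k hk => refL_mono a k hk),
        show 1 + d = d + 1 from by omega]
    rw [hmid, hconst]
    have h2 := refL_mono a (d + 1) (by omega)
    rw [show d + 1 + 1 = d + 2 from by omega] at h2
    omega
-- recABCD characterised by split point: best (prefix pair up to k) + (suffix pair from k+1)
lemma recABCD_char (a : Nat → Int) : ∀ d,
    recABCD a (d + 3) = some (imax (fun k => refL a k + refR a (d + 3) (k + 1)) 1 d) := by
  intro d
  induction d with
  | zero =>
    rw [show (0:Nat) + 3 = 2 + 1 from rfl, recABCD, recABC_char a 0]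
    have h2 : recABCD a 2 = none := by simp [recABCD, recABC, recAB, pvOmax]
    rw [h2]
    simp only [pvOmax, Option.map_some, imax]
    congr 1
    rw [refR]
    simp
    omega
  | succ d ih =>
    rw [show d + 1 + 3 = (d + 3) + 1 from rfl, recABCD, recABC_char a (d + 1), ih]
    simp only [pvOmax, Option.map_some]
    congr 1
    rw [imax]
    simp only [show (1:Nat) + d + 1 = d + 2 from by omega,
      show d + 1 + 1 - (d + 2) = 0 from by omega,
      show d + 1 + 1 = d + 2 from by omega, show d + 3 + 1 = d + 4 from by omega,
      show d + 2 + 1 = d + 3 from by omega, imax]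
    have hbase : refR a (d + 4) (d + 3) = a (d + 3) - a (d + 4) := by
      rw [refR]
      have : ¬ d + 3 + 1 < d + 4 := by omega
      simp only [this, reduceDIte]
      rw [show d + 4 - 1 = d + 3 from by omega]
    have hmid : imax (fun k => refL a k + refR a (d + 4) (k + 1)) 1 d
        = max (imax (fun k => refL a k + refR a (d + 3) (k + 1)) 1 d)
              (imax (fun k => refL a k + imax a (k + 1) (d + 2 - k) - a (d + 4)) 1 d) := by
      refine imax_split _ _ _ d 1 ?_
      intro k h1 h2
      show refL a k + refR a (d + 4) (k + 1)
        = max (refL a k + refR a (d + 3) (k + 1))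
              (refL a k + imax a (k + 1) (d + 2 - k) - a (d + 4))
      rw [show d + 4 = (d + 3) + 1 from by omega, refR_step a (d + 3) (k + 1) (by omega),
        show d + 3 - (k + 1) = d + 2 - k from by omega]
      omega
    have hsub : imax (fun k => refL a k + imax a (k + 1) (d + 2 - k) - a (d + 4)) 1 d
        = imax (fun k => refL a k + imax a (k + 1) (d + 2 - k)) 1 d - a (d + 4) :=
      imax_sub (fun k => refL a k + imax a (k + 1) (d + 2 - k)) (a (d + 4)) d 1
    rw [hbase, hmid, hsub]
    omega

-- ---- B-side loop specifications ----

lemma pvLoopL_spec (n : Nat) (a : Nat → Int) :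
    ∀ d k g pm, n - k = d → 2 ≤ k → pm = recA a (k - 1) →
    (∀ j, 1 ≤ j → j < k → g j = refL a j) →
    ∀ t, 1 ≤ t → t < n → (pvLoopL n a g pm k).1 t = refL a t := by
  intro d
  induction d with
  | zero =>
    intro k g pm hd hk hpm hg t h1 htn
    rw [pvLoopL]
    have : ¬ k < n := by omega
    simp only [this, reduceDIte]
    exact hg t h1 (by omega)
  | succ d ih =>
    intro k g pm hd hk hpm hg t h1 htn
    rw [pvLoopL]
    have hkn : k < n := by omega
    simp only [hkn, reduceDIte]
    refine ih (k + 1) _ _ (by omega) (by omega) ?_ ?_ t h1 htn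
    · rw [hpm, show k + 1 - 1 = k from by omega, recA_succ a k (by omega)]
    · intro j hj1 hjk
      by_cases hjk' : j = k
      · subst hjk'
        rw [if_pos rfl, hg (j - 1) (by omega) (by omega), hpm, refL_succ a j hk]
      · simp only [hjk', if_false]
        exact hg j hj1 (by omega)

lemma pvLoopR_spec (n : Nat) (a : Nat → Int) (hn : 4 ≤ n) :
    ∀ j1 g sm, j1 ≤ n - 2 → sm = refMin a (n - 1) j1 →
    (∀ t, j1 ≤ t → t ≤ n - 2 → g t = refR a (n - 1) t) →
    ∀ t, t ≤ n - 2 → (pvLoopR a g sm j1).1 t = refR a (n - 1) t := by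
  intro j1
  induction j1 with
  | zero =>
    intro g sm _ _ hg t ht
    exact hg t (by omega) ht
  | succ j ih =>
    intro g sm hj1 hsm hg t ht
    rw [pvLoopR]
    refine ih _ _ (by omega) ?_ ?_ t ht
    · rw [hsm, refMin_lt a (n - 1) j (by omega)]
      omega
    · intro u hu1 hu2
      by_cases huj : u = j
      · subst huj
        rw [if_pos rfl, hg (u + 1) (by omega) (by omega), hsm]
        have hc : u + 1 < n - 1 := by omega
        conv_rhs => rw [refR]
        simp only [hc, reduceDIte]
      · simp only [huj, if_false]
        exact hg u (by omega) hu2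

lemma pvLoopC_spec (n : Nat) (lf rt : Nat → Int) (hn : 4 ≤ n) :
    ∀ d k best, n - 2 - k = d → 2 ≤ k → k ≤ n - 2 →
    best = imax (fun k' => lf k' + rt (k' + 1)) 1 (k - 2) →
    pvLoopC n lf rt best k = imax (fun k' => lf k' + rt (k' + 1)) 1 (n - 4) := by
  intro d
  induction d with
  | zero =>
    intro k best hd hk2 hkn hbest
    rw [pvLoopC]
    have : ¬ k < n - 2 := by omega
    simp only [this, reduceDIte]
    rw [hbest, show k - 2 = n - 4 from by omega]
  | succ d ih =>
    intro k best hd hk2 hkn hbest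
    rw [pvLoopC]
    have hlt : k < n - 2 := by omega
    simp only [hlt, reduceDIte]
    refine ih (k + 1) _ (by omega) (by omega) (by omega) ?_
    rw [hbest, show k + 1 - 2 = (k - 2) + 1 from by omega, imax,
      show 1 + (k - 2) + 1 = k from by omega]

-- B's result equals the same recurrence value
lemma portB_eq (array : List Int) (h4 : ¬ array.length < 4) :
    maximizeExpression_alt array =
      (recABCD (fun i => array.getD i 0) (array.length - 1)).getD 0 := by
  simp only [maximizeExpression_alt, h4, if_false]
  set n := array.length with hn
  set a : Nat → Int := fun i => array.getD i 0 with ha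
  have hn4 : 4 ≤ n := by omega
  have hlf : ∀ t, 1 ≤ t → t < n →
      (pvLoopL n a (fun j => if j = 1 then a 0 - a 1 else 0) (max (a 0) (a 1)) 2).1 t
        = refL a t := by
    refine pvLoopL_spec n a (n - 2) 2 _ _ (by omega) (by omega) ?_ ?_
    · rw [show (2:Nat) - 1 = 1 from rfl, recA, recA, show (0:Nat) + 1 = 1 from rfl]
      omega
    · intro j hj1 hj2
      have : j = 1 := by omega
      subst this
      rw [if_pos rfl, refL]
  have hrt : ∀ t, t ≤ n - 2 →
      (pvLoopR a (fun j => if j = n - 2 then a (n - 2) - a (n - 1) else 0)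
        (min (a (n - 2)) (a (n - 1))) (n - 2)).1 t = refR a (n - 1) t := by
    refine pvLoopR_spec n a hn4 (n - 2) _ _ (by omega) ?_ ?_
    · rw [refMin_lt a (n - 1) (n - 2) (by omega), show n - 2 + 1 = n - 1 from by omega,
        refMin_last]
    · intro t ht1 ht2
      have : t = n - 2 := by omega
      subst this
      rw [if_pos rfl]
      have hc : ¬ (n - 2) + 1 < n - 1 := by omega
      conv_rhs => rw [refR]
      simp only [hc, reduceDIte]
      rw [show n - 1 - 1 = n - 2 from by omega]
  have hC := pvLoopC_spec n
    (pvLoopL n a (fun j => if j = 1 then a 0 - a 1 else 0) (max (a 0) (a 1)) 2).1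
    (pvLoopR a (fun j => if j = n - 2 then a (n - 2) - a (n - 1) else 0)
      (min (a (n - 2)) (a (n - 1))) (n - 2)).1 hn4 (n - 4) 2 _ (by omega) (by omega) (by omega)
    (by rw [show (2:Nat) - 2 = 0 from rfl, imax])
  rw [hC, imax_congr _ (fun k => refL a k + refR a (n - 1) (k + 1)) (n - 4) 1
    (by intro k hk1 hk2
        rw [hlf k hk1 (by omega), hrt (k + 1) (by omega)]),
    show n - 1 = (n - 4) + 3 from by omega, recABCD_char a (n - 4)]
  rfl

-- ===== VERDICT (by name: the statement is the Claim_ definition above) =====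
theorem maximizeExpression_spec : Claim_equal_maximizeExpression := by
  intro array _
  unfold Spec_maximizeExpression
  by_cases h4 : array.length < 4
  · simp [maximizeExpression, maximizeExpression_alt, h4]
  · rw [portA_eq array h4, portB_eq array h4]
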